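-- pv_equiv track=rewrite | github.com/Amirshox/ProblemSolving | binarysearch.com/List-Min-Replacement.py | solve
-- ===== SOURCE A (Python) =====
-- def solve(nums):
--     result = []
--     for i in range(len(nums)):
--         if i == 0:
--             result.append(0)
--         else:
--             result.append(min(nums[:i]))
--     return result
-- ===== SOURCE B (Python) =====
-- def solve(nums):
--     if not nums:
--         return []
--     res = [0]
--     m = nums[0]
--     for x in nums[1:]:
--         res.append(m)
--         if x < m:
--             m = x
--     return res
-- ===== Notes on version B (the rewrite author's own statement) =====
-- stated objective: faster
-- what changed: Replaces the per-index recomputation of min(nums[:i]) with a single pass maintaining a running minimum.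
import Mathlib
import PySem

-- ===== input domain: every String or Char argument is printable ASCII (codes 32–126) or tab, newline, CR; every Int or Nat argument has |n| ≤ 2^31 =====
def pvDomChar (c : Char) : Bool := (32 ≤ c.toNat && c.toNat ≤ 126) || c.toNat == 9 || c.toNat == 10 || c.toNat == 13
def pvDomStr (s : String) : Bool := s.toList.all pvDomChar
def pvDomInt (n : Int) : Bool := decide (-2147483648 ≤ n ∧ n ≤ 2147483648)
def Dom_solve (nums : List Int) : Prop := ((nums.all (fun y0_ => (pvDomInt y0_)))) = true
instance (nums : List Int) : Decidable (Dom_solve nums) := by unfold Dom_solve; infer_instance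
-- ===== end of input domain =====

-- B replaces A's per-index recomputation of min(nums[:i]) with a single pass keeping a running minimum (faster).

-- ===== PORT A =====
-- for i in range(len(nums)): append 0 if i == 0 else min(nums[:i])
def solve (nums : List Int) : List Int :=
  (PySem.List.pyRange 0 (nums.length : Int) 1).foldl
    (fun result i =>
      if i == 0 then result ++ [0]
      else result ++ [(PySem.List.min? (PySem.List.slice nums none (some i)) (fun y => y)).getD 0])
    []
-- note: for i ≥ 1 the slice is nonempty, so min? is always `some`; .getD 0 is never the default

-- ===== PORT B =====
def solve_alt (nums : List Int) : List Int :=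
  match nums with
  | [] => []
  | x :: xs =>
    (xs.foldl (fun (p : List Int × Int) y =>
        (p.1 ++ [p.2], if y < p.2 then y else p.2)) ([0], x)).1

-- ===== PRECONDITION & SPEC =====
def Spec_solve (nums : List Int) (out : List Int) : Prop := out = solve_alt nums
instance (nums : List Int) (out : List Int) : Decidable (Spec_solve nums out) := by unfold Spec_solve; infer_instance

-- ===== CLAIM (what is proved, stated in full; the proofs are below) =====
def Claim_equal_solve : Prop := ∀ (nums : List Int), Dom_solve nums → Spec_solve nums (solve nums)

-- ===== LEMMAS AND PROOFS =====

-- prefix-minimum stream: F m xs lists the running minimum before each element of xs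
theorem foldl_min_eq (l : List Int) (m : Int) :
    l.foldl min m = l.foldl (fun a b => if b < a then b else a) m := by
  induction l generalizing m with
  | nil => rfl
  | cons y ys ih =>
    simp only [List.foldl_cons]
    rw [ih]
    congr 1
    simp [min_def]; omega

def F (m : Int) : List Int → List Int
  | [] => []
  | y :: ys => m :: F (if y < m then y else m) ys

theorem F_length (m : Int) (xs : List Int) : (F m xs).length = xs.length := by
  induction xs generalizing m with
  | nil => rfl
  | cons y ys ih => simp [F, ih]

theorem B_fold (xs : List Int) (res : List Int) (m : Int) :
    (xs.foldl (fun (p : List Int × Int) y =>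
        (p.1 ++ [p.2], if y < p.2 then y else p.2)) (res, m)).1 = res ++ F m xs := by
  induction xs generalizing res m with
  | nil => simp [F]
  | cons y ys ih => simp [F, ih]

theorem F_getElem (xs : List Int) (m : Int) (j : Nat) (hj : j < xs.length) :
    (F m xs)[j]'(by rw [F_length]; exact hj) =
      (xs.take j).foldl (fun a b => if b < a then b else a) m := by
  induction xs generalizing m j with
  | nil => simp at hj
  | cons y ys ih =>
    cases j with
    | zero => simp [F]
    | succ j =>
      simp only [F, List.getElem_cons_succ, List.take_succ_cons, List.foldl_cons]
      exact ih _ _ (by simpa using hj)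

theorem min_take (x : Int) (xs : List Int) (k : Nat) :
    PySem.List.min? ((x :: xs).take (k + 1)) (fun y => y) =
      some ((xs.take k).foldl (fun a b => if b < a then b else a) x) := by
  rw [List.take_succ_cons, PySem.List.min?_id_cons, foldl_min_eq]


theorem solve_map (nums : List Int) :
    solve nums = (List.range nums.length).map
      (fun k => if k = 0 then 0
        else (PySem.List.min? (nums.take k) (fun y => y)).getD 0) := by
  unfold solve
  rw [PySem.List.pyRange_one]
  simp only [Int.sub_zero, Int.toNat_natCast]
  rw [List.foldl_map]
  have : ∀ (l : List Nat) (acc : List Int),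
      l.foldl (fun result (k : Nat) =>
        if ((0 : Int) + k) == 0 then result ++ [0]
        else result ++ [(PySem.List.min? (PySem.List.slice nums none (some ((0:Int) + k))) (fun y => y)).getD 0]) acc
      = acc ++ l.map (fun k => if k = 0 then 0
          else (PySem.List.min? (nums.take k) (fun y => y)).getD 0) := by
    intro l
    induction l with
    | nil => simp
    | cons k t ih =>
      intro acc
      simp only [List.foldl_cons, List.map_cons]
      rw [ih]
      by_cases hk : k = 0
      · subst hk; simp
      · have hkz : ¬ (((0 : Int) + (k : Int)) == 0) = true := by
          simp; omega
        simp only [if_neg (by simpa using hkz), hkz]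
        rw [Int.zero_add, PySem.List.slice_to_natCast]
        simp
  rw [this]; simp

theorem solve_spec_aux (nums : List Int) : solve nums = solve_alt nums := by
  cases nums with
  | nil => simp [solve, solve_alt, PySem.List.pyRange]
  | cons x xs =>
    rw [solve_map]
    show _ = (xs.foldl (fun (p : List Int × Int) y =>
        (p.1 ++ [p.2], if y < p.2 then y else p.2)) ([0], x)).1
    rw [B_fold]
    apply List.ext_getElem
    · simp [F_length]
    intro j h1 h2
    rw [List.getElem_map, List.getElem_range]
    cases j with
    | zero => simp
    | succ j =>
      have hj : j < xs.length := by
        simp [F_length] at h2; omega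
      rw [min_take]
      simp only [Nat.succ_ne_zero, if_false, Option.getD_some]
      show _ = (0 :: F x xs)[j + 1]'(by simpa [F_length] using h2)
      rw [List.getElem_cons_succ, F_getElem xs x j hj]

-- ===== VERDICT (by name: the statement is the Claim_ definition above) =====
theorem solve_spec : Claim_equal_solve := by
  intro nums _
  exact solve_spec_aux nums
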